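-- pv_equiv track=rewrite | github.com/amadeusdotpng/aoc | y24_py/d21.py | get_numpad_sequences
-- ===== SOURCE A (Python) =====
-- from itertools import permutations, pairwise
--
-- NUMPAD_COORDS = {
--     'A': 3+2j,
--     '0': 3+1j,
--     '3': 2+2j,
--     '2': 2+1j,
--     '1': 2+0j,
--     '6': 1+2j,
--     '5': 1+1j,
--     '4': 1+0j,
--     '9': 0+2j,
--     '8': 0+1j,
--     '7': 0+0j,
-- }
--
-- def get_numpad_sequences(f, t):
--     assert f in NUMPAD_COORDS
--     assert t in NUMPAD_COORDS
--     fs = NUMPAD_COORDS[f]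
--     ts = NUMPAD_COORDS[t]
--     d = ts - fs
--     ud = ('v' if d.real > 0 else '^') * int(abs(d.real))
--     lr = ('>' if d.imag > 0 else '<') * int(abs(d.imag))
--     udlr = ud+lr
--     return {
--         s+'A' for s in map(lambda t: ''.join(t), permutations(udlr, len(udlr)))
--         if not (
--             (f == '7' and s.startswith('vvv')) or
--             (f == '4' and s.startswith('vv' )) or
--             (f == '1' and s.startswith('v'  )) or
--             (f == 'A' and s.startswith('<<' )) or
--             (f == '0' and s.startswith('<'  ))
--         )
--     }
-- ===== SOURCE B (Python) =====
-- from itertools import combinations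
--
-- # (row, col) integer coordinates on the numpad; row grows downward, col rightward.
-- COORDS = {
--     'A': (3, 2), '0': (3, 1),
--     '3': (2, 2), '2': (2, 1), '1': (2, 0),
--     '6': (1, 2), '5': (1, 1), '4': (1, 0),
--     '9': (0, 2), '8': (0, 1), '7': (0, 0),
-- }
--
-- BAD_PREFIX = {'7': 'vvv', '4': 'vv', '1': 'v', 'A': '<<', '0': '<'}
--
-- def get_numpad_sequences(f, t):
--     r1, c1 = COORDS[f]
--     r2, c2 = COORDS[t]
--     dr, dc = r2 - r1, c2 - c1
--     vchar = 'v' if dr > 0 else '^'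
--     hchar = '>' if dc > 0 else '<'
--     k, m = abs(dr), abs(dc)
--     n = k + m
--     bad = BAD_PREFIX.get(f)
--     out = set()
--     for pos in combinations(range(n), k):
--         s = ''.join(vchar if i in pos else hchar for i in range(n))
--         if bad is None or not s.startswith(bad):
--             out.add(s + 'A')
--     return out
-- ===== Notes on version B (the rewrite author's own statement) =====
-- stated objective: alternative
-- what changed: Replaces complex-number deltas plus full permutations-with-set-dedup by integer (row,col) deltas and direct enumeration of the k vertical-move positions via itertools.combinations, generating each distinct interleaving exactly once.
import Mathlib
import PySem

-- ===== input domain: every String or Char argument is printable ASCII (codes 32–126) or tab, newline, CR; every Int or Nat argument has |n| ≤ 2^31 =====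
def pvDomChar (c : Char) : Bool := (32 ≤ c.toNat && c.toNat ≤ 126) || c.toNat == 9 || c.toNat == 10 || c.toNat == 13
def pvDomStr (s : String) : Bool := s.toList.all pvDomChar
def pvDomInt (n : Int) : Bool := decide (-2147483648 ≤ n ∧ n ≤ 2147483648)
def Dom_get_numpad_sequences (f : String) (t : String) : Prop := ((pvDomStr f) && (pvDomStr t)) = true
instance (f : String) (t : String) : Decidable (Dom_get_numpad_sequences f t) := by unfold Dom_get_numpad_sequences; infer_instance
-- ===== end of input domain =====

-- B replaces complex deltas + full permutations-with-set-dedup by integer (row,col) deltas and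
-- direct enumeration of the vertical-move positions via combinations (objective: alternative).

-- ===== PORT A =====
-- NUMPAD_COORDS: complex coordinates ported as (real, imag) integer pairs — exact here, since
-- all coordinates and their differences are small integers represented exactly by Python floats.
def numpadCoords : PySem.Dict String (Int × Int) := PySem.Dict.ofList
  [("A", (3, 2)), ("0", (3, 1)), ("3", (2, 2)), ("2", (2, 1)), ("1", (2, 0)),
   ("6", (1, 2)), ("5", (1, 1)), ("4", (1, 0)), ("9", (0, 2)), ("8", (0, 1)), ("7", (0, 0))]

-- hand port of itertools.permutations(pool, len(pool)): exact, yields permutations in the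
-- lexicographic order of index sequences, i.e. element i first, then permutations of the rest.
def pyPermsAux : Nat → List Char → List (List Char)
  | 0, _ => [[]]
  | n+1, l => (List.range l.length).flatMap
      (fun i => (pyPermsAux n (l.eraseIdx i)).map (fun p => l.getD i ' ' :: p))

def pyPerms (l : List Char) : List (List Char) := pyPermsAux l.length l

def get_numpad_sequences (f : String) (t : String) : List String :=
  -- asserts 'f in NUMPAD_COORDS' / 't in NUMPAD_COORDS' are Pre_; getD's default is unreachable there
  let fs := PySem.Dict.getD numpadCoords f (0, 0)
  let ts := PySem.Dict.getD numpadCoords t (0, 0)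
  let d : Int × Int := (ts.1 - fs.1, ts.2 - fs.2)
  let ud := List.replicate d.1.natAbs (if d.1 > 0 then 'v' else '^')
  let lr := List.replicate d.2.natAbs (if d.2 > 0 then '>' else '<')
  let udlr := ud ++ lr
  PySem.Set.ofList
    ((pyPerms udlr).map String.ofList
      |>.filter (fun s => !(
          (f == "7" && PySem.Str.startswith s "vvv") ||
          (f == "4" && PySem.Str.startswith s "vv") ||
          (f == "1" && PySem.Str.startswith s "v") ||
          (f == "A" && PySem.Str.startswith s "<<") ||
          (f == "0" && PySem.Str.startswith s "<")))
      |>.map (fun s => s ++ "A"))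

-- ===== PORT B =====
def coordsB : PySem.Dict String (Int × Int) := PySem.Dict.ofList
  [("A", (3, 2)), ("0", (3, 1)), ("3", (2, 2)), ("2", (2, 1)), ("1", (2, 0)),
   ("6", (1, 2)), ("5", (1, 1)), ("4", (1, 0)), ("9", (0, 2)), ("8", (0, 1)), ("7", (0, 0))]

def badPrefixB : PySem.Dict String String := PySem.Dict.ofList
  [("7", "vvv"), ("4", "vv"), ("1", "v"), ("A", "<<"), ("0", "<")]

-- hand port of itertools.combinations(pool, k): exact, lexicographic order over the pool's indices.
def pyCombs : Nat → List Nat → List (List Nat)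
  | 0, _ => [[]]
  | _+1, [] => []
  | k+1, x :: xs => ((pyCombs k xs).map (fun c => x :: c)) ++ pyCombs (k+1) xs

def get_numpad_sequences_alt (f : String) (t : String) : List String :=
  let c1 := PySem.Dict.getD coordsB f (0, 0)
  let c2 := PySem.Dict.getD coordsB t (0, 0)
  let dr := c2.1 - c1.1
  let dc := c2.2 - c1.2
  let vchar := if dr > 0 then 'v' else '^'
  let hchar := if dc > 0 then '>' else '<'
  let k := dr.natAbs
  let m := dc.natAbs
  let n := k + m
  let bad := PySem.Dict.get? badPrefixB f
  (pyCombs k (List.range n)).foldl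
    (fun out pos =>
      let s := String.ofList ((List.range n).map (fun i => if pos.contains i then vchar else hchar))
      if (match bad with
          | none => true
          | some b => !PySem.Str.startswith s b) then
        PySem.Set.add out (s ++ "A")
      else out)
    PySem.Set.empty

-- ===== PRECONDITION & SPEC =====
-- A asserts both keys are numpad buttons and raises AssertionError otherwise; Pre_ is exactly that.
def Pre_get_numpad_sequences (f : String) (t : String) : Prop :=
  f ∈ ["A", "0", "3", "2", "1", "6", "5", "4", "9", "8", "7"] ∧
  t ∈ ["A", "0", "3", "2", "1", "6", "5", "4", "9", "8", "7"]
instance (f : String) (t : String) : Decidable (Pre_get_numpad_sequences f t) := by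
  unfold Pre_get_numpad_sequences; infer_instance

def pvWitness_get_numpad_sequences : String × String := ("A", "7")

def Spec_get_numpad_sequences (f : String) (t : String) (out : List String) : Prop := out = get_numpad_sequences_alt f t
instance (f : String) (t : String) (out : List String) : Decidable (Spec_get_numpad_sequences f t out) := by unfold Spec_get_numpad_sequences; infer_instance

-- ===== CLAIM (what is proved, stated in full; the proofs are below) =====
def Claim_equal_get_numpad_sequences : Prop := ∀ (f : String) (t : String), Dom_get_numpad_sequences f t → Pre_get_numpad_sequences f t → Spec_get_numpad_sequences f t (get_numpad_sequences f t)

-- ===== LEMMAS AND PROOFS =====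

-- ===== VERDICT (by name: the statement is the Claim_ definition above) =====
set_option maxRecDepth 4000 in
theorem get_numpad_sequences_spec : Claim_equal_get_numpad_sequences := by
  intro f t _ hpre
  unfold Spec_get_numpad_sequences
  obtain ⟨hf, ht⟩ := hpre
  fin_cases hf <;> fin_cases ht <;> decide
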